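-- pv_equiv track=rewrite | github.com/Nabilleb/PythonGradeSystem | index.py | most_consistent_by_range
-- ===== SOURCE A (Python) =====
-- def most_consistent_by_range(journal):
--     min_diff = float('inf')
--     consistent_student = ""
--     for name, grades in journal.items():
--         grade_range = max(grades) - min(grades)
--         if grade_range < min_diff:
--             min_diff = grade_range
--             consistent_student = name
--     return f"Most consistent (by smallest diff) is {consistent_student} with a difference of {min_diff}"
-- ===== SOURCE B (Python) =====
-- def most_consistent_by_range(journal):
--     table = [(name, max(g) - min(g)) for name, g in journal.items()]
--     name, diff = sorted(table, key=lambda t: t[1])[0]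
--     return f"Most consistent (by smallest diff) is {name} with a difference of {diff}"
-- ===== Notes on version B (the rewrite author's own statement) =====
-- stated objective: alternative
-- what changed: B builds a (name, range) table and stably sorts it by range, returning the first element of the sorted table (stability gives the first-seen winner on ties), instead of A's running-minimum scan with an inf sentinel; Pre_ excludes the empty journal, where B's sorted(...)[0] raises IndexError while A returns its inf/empty-name sentinel string, and journals containing an empty grade list, on which both raise ValueError.
-- outside the precondition, e.g. on most_consistent_by_range({}): A returns 'Most consistent (by smallest diff) is  with a difference of inf', B raises
import Mathlib
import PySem

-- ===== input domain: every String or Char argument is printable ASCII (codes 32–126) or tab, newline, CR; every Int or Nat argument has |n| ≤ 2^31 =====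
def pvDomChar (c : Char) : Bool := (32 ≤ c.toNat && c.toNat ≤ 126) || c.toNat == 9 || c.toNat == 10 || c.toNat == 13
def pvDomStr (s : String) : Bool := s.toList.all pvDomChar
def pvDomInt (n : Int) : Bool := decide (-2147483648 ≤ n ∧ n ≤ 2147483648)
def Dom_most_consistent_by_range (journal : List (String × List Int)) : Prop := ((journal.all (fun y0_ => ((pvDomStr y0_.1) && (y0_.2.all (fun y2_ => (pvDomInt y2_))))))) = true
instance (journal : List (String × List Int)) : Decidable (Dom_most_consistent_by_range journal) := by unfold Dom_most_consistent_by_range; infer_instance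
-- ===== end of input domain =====

-- B replaces A's running-minimum scan (inf sentinel, two mutable variables) by a stable sort
-- of a (name, range) table by range, taking the sorted table's first element
-- (objective: alternative; same return value on Pre_, proved below).

-- ===== PORT A =====
-- min_diff = float('inf') is modelled as Option Int (none = inf); the f-string prints "inf" then.
def most_consistent_by_range (journal : List (String × List Int)) : String :=
  let st := journal.foldl
    (fun (st : Option Int × String) ng =>
      let grade_range := (PySem.List.max? ng.2 (fun x => x)).getD 0
                         - (PySem.List.min? ng.2 (fun x => x)).getD 0
      match st.1 with
      | none => (some grade_range, ng.1)            -- grade_range < inf is always true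
      | some d => if grade_range < d then (some grade_range, ng.1) else st)
    (none, "")
  "Most consistent (by smallest diff) is " ++ st.2 ++ " with a difference of " ++
    (match st.1 with | none => "inf" | some d => PySem.Int.toStr d)

-- ===== PORT B =====
-- sorted(table, key=lambda t: t[1])[0]; the [] branch is Python's IndexError, excluded by Pre_.
def most_consistent_by_range_alt (journal : List (String × List Int)) : String :=
  let table := journal.map (fun ng =>
    (ng.1, (PySem.List.max? ng.2 (fun x => x)).getD 0
           - (PySem.List.min? ng.2 (fun x => x)).getD 0))
  match PySem.List.sorted table (fun t => t.2) false with
  | (name, diff) :: _ =>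
      "Most consistent (by smallest diff) is " ++ name ++ " with a difference of " ++
        PySem.Int.toStr diff
  | [] => ""

-- ===== PRECONDITION & SPEC =====
-- Pre_ excludes (i) the empty journal, on which A returns its ""/float('inf') sentinel string
-- while B's sorted(...)[0] raises IndexError, and (ii) journals containing an empty grade list,
-- on which both A and B raise ValueError from max([]).
def Pre_most_consistent_by_range (journal : List (String × List Int)) : Prop :=
  journal ≠ [] ∧ (journal.all (fun ng => !ng.2.isEmpty)) = true
instance (journal : List (String × List Int)) : Decidable (Pre_most_consistent_by_range journal) := by
  unfold Pre_most_consistent_by_range; infer_instance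
def pvWitness_most_consistent_by_range : (List (String × List Int)) := [("a", [1, 3]), ("b", [2])]
def Spec_most_consistent_by_range (journal : List (String × List Int)) (out : String) : Prop := out = most_consistent_by_range_alt journal
instance (journal : List (String × List Int)) (out : String) : Decidable (Spec_most_consistent_by_range journal out) := by unfold Spec_most_consistent_by_range; infer_instance

-- ===== CLAIM (what is proved, stated in full; the proofs are below) =====
def Claim_equal_most_consistent_by_range : Prop := ∀ (journal : List (String × List Int)), Dom_most_consistent_by_range journal → Pre_most_consistent_by_range journal → Spec_most_consistent_by_range journal (most_consistent_by_range journal)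

-- ===== LEMMAS AND PROOFS =====

-- the (name, range) projection shared by both ports
def pvRange (ng : String × List Int) : String × Int :=
  (ng.1, (PySem.List.max? ng.2 (fun x => x)).getD 0
         - (PySem.List.min? ng.2 (fun x => x)).getD 0)

-- A's loop state (min_diff, name) vs the insertion-sort accumulator: A's state is the head.
def pvRel (st : Option Int × String) (acc : List (String × Int)) : Prop :=
  match st.1 with
  | none => acc = [] ∧ st.2 = ""
  | some d => ∃ t, acc = (st.2, d) :: t

theorem pvInsert_head (x : String × Int) (h : String × Int) (t : List (String × Int)) :
    ∃ t', PySem.List.insertBy (fun a b => decide ((fun p : String × Int => p.2) a < (fun p : String × Int => p.2) b)) x (h :: t)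
          = (if x.2 < h.2 then x else h) :: t' := by
  by_cases hlt : x.2 < h.2 <;>
    simp [PySem.List.insertBy, hlt]

theorem pvLoop_eq (l : List (String × List Int)) :
    ∀ (st : Option Int × String) (acc : List (String × Int)), pvRel st acc →
    pvRel
      (l.foldl (fun (st : Option Int × String) ng =>
        let grade_range := (PySem.List.max? ng.2 (fun x => x)).getD 0
                           - (PySem.List.min? ng.2 (fun x => x)).getD 0
        match st.1 with
        | none => (some grade_range, ng.1)
        | some d => if grade_range < d then (some grade_range, ng.1) else st) st)
      ((l.map pvRange).foldl
        (fun acc x => PySem.List.insertBy (fun a b => decide ((fun p : String × Int => p.2) a < (fun p : String × Int => p.2) b)) x acc) acc) := by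
  induction l with
  | nil => intro st acc h; simpa using h
  | cons hd tl ih =>
    intro st acc h
    simp only [List.foldl_cons, List.map_cons]
    apply ih
    rcases st with ⟨md, cs⟩
    cases md with
    | none =>
      obtain ⟨hacc, _⟩ := h
      subst hacc
      exact ⟨[], by simp [PySem.List.insertBy, pvRange]⟩
    | some d =>
      obtain ⟨t, hacc⟩ := h
      subst hacc
      obtain ⟨t', ht'⟩ := pvInsert_head (pvRange hd) (cs, d) t
      by_cases hlt : ((PySem.List.max? hd.2 (fun x => x)).getD 0
                      - (PySem.List.min? hd.2 (fun x => x)).getD 0) < d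
      · simp only [pvRel, hlt, if_true]
        exact ⟨t', by simpa [pvRange, hlt] using ht'⟩
      · simp only [pvRel, hlt, if_false]
        exact ⟨t', by simpa [pvRange, hlt] using ht'⟩

-- ===== VERDICT (by name: the statement is the Claim_ definition above) =====
theorem most_consistent_by_range_spec : Claim_equal_most_consistent_by_range := by
  intro journal _ hpre
  obtain ⟨hne, _⟩ := hpre
  unfold Spec_most_consistent_by_range most_consistent_by_range most_consistent_by_range_alt
  dsimp only
  have hsort := PySem.List.sorted_eq_foldl_insertBy
    (journal.map (fun ng =>
      (ng.1, (PySem.List.max? ng.2 (fun x => x)).getD 0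
             - (PySem.List.min? ng.2 (fun x => x)).getD 0)))
    (fun t : String × Int => t.2)
  have hmap : journal.map (fun ng =>
      (ng.1, (PySem.List.max? ng.2 (fun x => x)).getD 0
             - (PySem.List.min? ng.2 (fun x => x)).getD 0)) = journal.map pvRange := by
    simp [pvRange]
  have h := pvLoop_eq journal (none, "") [] (by simp [pvRel])
  rw [hsort, hmap]
  set A := journal.foldl
    (fun (st : Option Int × String) ng =>
      let grade_range := (PySem.List.max? ng.2 (fun x => x)).getD 0
                         - (PySem.List.min? ng.2 (fun x => x)).getD 0
      match st.1 with
      | none => (some grade_range, ng.1)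
      | some d => if grade_range < d then (some grade_range, ng.1) else st) (none, "") with hA
  rcases A with ⟨md, cs⟩
  cases md with
  | none =>
    obtain ⟨hacc, _⟩ := h
    exfalso
    rcases journal with _ | ⟨hd, tl⟩
    · exact hne rfl
    · have : ((hd :: tl).map pvRange).foldl
        (fun acc x => PySem.List.insertBy (fun a b => decide ((fun p : String × Int => p.2) a < (fun p : String × Int => p.2) b)) x acc) [] ≠ [] := by
        intro hnil
        have hperm : (((hd :: tl).map pvRange).foldl
          (fun acc x => PySem.List.insertBy (fun a b => decide ((fun p : String × Int => p.2) a < (fun p : String × Int => p.2) b)) x acc) []).Perm ((hd :: tl).map pvRange) := by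
          rw [← PySem.List.sorted_eq_foldl_insertBy]
          exact PySem.List.sorted_perm _ _ _
        rw [hnil] at hperm
        simpa using hperm.length_eq
      exact this hacc
  | some d =>
    obtain ⟨t, hacc⟩ := h
    rw [hacc]
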